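-- pv_equiv track=rewrite | github.com/diekhans/flair | src/flair/count_sam_transcripts.py | identify_corrected_ends
-- ===== SOURCE A (Python) =====
-- def identify_corrected_ends(exoninfo, startpos, endpos, transcript_to_genomic_ends, tname, output_endpos, tlen):
--     """Locate the intron-relative position of a read's start/end on its best
--     transcript so callers can translate transcript coords back to genome."""
--     left_intron_index, left_dist, right_intron_index, right_dist = None, None, None, None
--     # Can only correct read ends if assigned to spliced transcript
--     if output_endpos:
--         if len(exoninfo) > 1:
--             gtstrand = transcript_to_genomic_ends[tname][2]
--             currpos = 0
--             for i in range(len(exoninfo) - 1):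
--                 elen = exoninfo[i]
--                 currpos += elen
--                 if left_intron_index is None and startpos < currpos:
--                     left_intron_index = i
--                     left_dist = currpos - startpos
--                 if currpos < endpos:
--                     right_intron_index = i
--                     right_dist = endpos - currpos
--             if gtstrand == '-':
--                 left_intron_index, right_intron_index = (len(exoninfo) - 2) - right_intron_index, (len(exoninfo) - 2) - left_intron_index
--                 left_dist, right_dist = right_dist, left_dist
--         else:
--             left_dist = startpos
--             right_dist = tlen - endpos
--     return left_intron_index, left_dist, right_intron_index, right_dist
-- ===== SOURCE B (Python) =====
-- from itertools import accumulate
-- from bisect import bisect_left, bisect_right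
--
--
-- def identify_corrected_ends(exoninfo, startpos, endpos, transcript_to_genomic_ends, tname, output_endpos, tlen):
--     """Binary-search the read ends against a prefix-sum table of exon lengths
--     instead of scanning every exon linearly."""
--     if not output_endpos:
--         return None, None, None, None
--     if len(exoninfo) <= 1:
--         return None, startpos, None, tlen - endpos
--     gtstrand = transcript_to_genomic_ends[tname][2]
--     prefix = list(accumulate(exoninfo[:-1]))
--     li = bisect_right(prefix, startpos)
--     if li == len(prefix):
--         li, ld = None, None
--     else:
--         ld = prefix[li] - startpos
--     ri = bisect_left(prefix, endpos) - 1
--     if ri < 0: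
--         ri, rd = None, None
--     else:
--         rd = endpos - prefix[ri]
--     if gtstrand == '-':
--         n = len(exoninfo) - 2
--         li, ri = n - ri, n - li
--         ld, rd = rd, ld
--     return li, ld, ri, rd
-- ===== Notes on version B (the rewrite author's own statement) =====
-- stated objective: alternative
-- what changed: Replaces the linear exon scan that accumulates lengths and tracks the first/last intron hit with a prefix-sum table over exoninfo[:-1] queried by bisect_right/bisect_left binary searches.
import Mathlib
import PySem

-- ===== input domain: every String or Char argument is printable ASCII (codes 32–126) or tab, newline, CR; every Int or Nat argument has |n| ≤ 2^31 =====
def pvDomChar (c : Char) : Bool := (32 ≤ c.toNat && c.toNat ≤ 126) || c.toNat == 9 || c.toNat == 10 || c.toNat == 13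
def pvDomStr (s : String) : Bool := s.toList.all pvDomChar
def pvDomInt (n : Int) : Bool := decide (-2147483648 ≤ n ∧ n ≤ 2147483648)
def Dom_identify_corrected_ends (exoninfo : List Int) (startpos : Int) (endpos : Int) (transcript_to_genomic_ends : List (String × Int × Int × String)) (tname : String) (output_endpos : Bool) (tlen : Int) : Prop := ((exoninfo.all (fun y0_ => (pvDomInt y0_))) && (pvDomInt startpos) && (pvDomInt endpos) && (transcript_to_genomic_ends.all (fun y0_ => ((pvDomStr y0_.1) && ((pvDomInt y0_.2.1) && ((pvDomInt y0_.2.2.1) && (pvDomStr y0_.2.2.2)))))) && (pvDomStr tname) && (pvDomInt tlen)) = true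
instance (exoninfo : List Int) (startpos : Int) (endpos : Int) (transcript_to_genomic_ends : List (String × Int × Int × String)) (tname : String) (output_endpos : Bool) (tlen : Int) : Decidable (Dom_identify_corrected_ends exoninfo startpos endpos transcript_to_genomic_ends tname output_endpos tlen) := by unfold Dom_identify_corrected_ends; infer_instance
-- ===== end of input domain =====

-- B replaces A's linear exon scan by a prefix-sum table queried with binary search (alternative
-- algorithm, similar cost); return-value equivalence on Pre_ (nonnegative exon lengths, key present,
-- minus-strand read ends inside the introns).

-- ===== PORT A =====
-- loop state: (currpos, left_intron_index, left_dist, right_intron_index, right_dist)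
def pvStepA (startpos endpos : Int) (exoninfo : List Int)
    (st : Int × Option Int × Option Int × Option Int × Option Int) (i : Int) :
    Int × Option Int × Option Int × Option Int × Option Int :=
  let elen := PySem.List.pyGetD exoninfo i 0
  let currpos := st.1 + elen
  let li := st.2.1; let ld := st.2.2.1; let ri := st.2.2.2.1; let rd := st.2.2.2.2
  let li' := if li = none ∧ startpos < currpos then some i else li
  let ld' := if li = none ∧ startpos < currpos then some (currpos - startpos) else ld
  let ri' := if currpos < endpos then some i else ri
  let rd' := if currpos < endpos then some (endpos - currpos) else rd
  (currpos, li', ld', ri', rd')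

def identify_corrected_ends (exoninfo : List Int) (startpos : Int) (endpos : Int) (transcript_to_genomic_ends : List (String × Int × Int × String)) (tname : String) (output_endpos : Bool) (tlen : Int) : Option Int × Option Int × Option Int × Option Int :=
  if output_endpos then
    if 1 < exoninfo.length then
      -- transcript_to_genomic_ends[tname][2]; KeyError (none) is excluded by Pre_, default only for totality
      let gtstrand := ((PySem.Dict.mk transcript_to_genomic_ends).getD tname (0, 0, "")).2.2
      let st := (PySem.List.pyRange 0 (PySem.List.len exoninfo - 1) 1).foldl
        (pvStepA startpos endpos exoninfo) (0, none, none, none, none)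
      let li := st.2.1; let ld := st.2.2.1; let ri := st.2.2.2.1; let rd := st.2.2.2.2
      if gtstrand = "-" then
        -- Python raises TypeError here when li/ri is None; those inputs are excluded by Pre_,
        -- .getD 0 is only for totality
        (some ((PySem.List.len exoninfo - 2) - ri.getD 0), rd,
         some ((PySem.List.len exoninfo - 2) - li.getD 0), ld)
      else (li, ld, ri, rd)
    else (none, some startpos, none, some (tlen - endpos))
  else (none, none, none, none)

-- ===== PORT B =====
-- itertools.accumulate: running prefix sums
def pvAccum (c : Int) : List Int → List Int
  | [] => []
  | e :: xs => (c + e) :: pvAccum (c + e) xs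

def identify_corrected_ends_alt (exoninfo : List Int) (startpos : Int) (endpos : Int) (transcript_to_genomic_ends : List (String × Int × Int × String)) (tname : String) (output_endpos : Bool) (tlen : Int) : Option Int × Option Int × Option Int × Option Int :=
  if !output_endpos then (none, none, none, none)
  else if exoninfo.length ≤ 1 then (none, some startpos, none, some (tlen - endpos))
  else
    let gtstrand := ((PySem.Dict.mk transcript_to_genomic_ends).getD tname (0, 0, "")).2.2
    let prefix_ := pvAccum 0 exoninfo.dropLast
    let liN := PySem.List.bisectRight prefix_ startpos
    let li : Option Int := if liN = prefix_.length then none else some (liN : Int)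
    let ld : Option Int := if liN = prefix_.length then none else some (prefix_.getD liN 0 - startpos)
    let riI : Int := (PySem.List.bisectLeft prefix_ endpos : Int) - 1
    let ri : Option Int := if riI < 0 then none else some riI
    let rd : Option Int := if riI < 0 then none else some (endpos - prefix_.getD riI.toNat 0)
    if gtstrand = "-" then
      -- Python raises TypeError here when li/ri is None; excluded by Pre_, .getD 0 only for totality
      let n := PySem.List.len exoninfo - 2
      (some (n - ri.getD 0), rd, some (n - li.getD 0), ld)
    else (li, ld, ri, rd)

-- ===== PRECONDITION & SPEC =====
-- Pre_ excludes (only in the spliced output_endpos branch): negative exon lengths — outside the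
-- function's natural domain of exon lengths, and A's linear scan over an unsorted prefix table is an
-- accident B's binary search need not match (see cites; only exoninfo[:-1] feeds the table) —, a tname missing from the dict (A raises
-- KeyError), and minus-strand inputs whose read start/end falls beyond all introns (A raises
-- TypeError subtracting None).
def Pre_identify_corrected_ends (exoninfo : List Int) (startpos : Int) (endpos : Int) (transcript_to_genomic_ends : List (String × Int × Int × String)) (tname : String) (output_endpos : Bool) (tlen : Int) : Prop :=
  output_endpos = true → 1 < exoninfo.length →
    ((∀ x ∈ exoninfo.dropLast, 0 ≤ x) ∧
     ((PySem.Dict.mk transcript_to_genomic_ends).get? tname).isSome = true ∧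
     (((PySem.Dict.mk transcript_to_genomic_ends).getD tname (0, 0, "")).2.2 = "-" →
       startpos < exoninfo.dropLast.sum ∧ exoninfo.headI < endpos))
instance (exoninfo : List Int) (startpos : Int) (endpos : Int) (transcript_to_genomic_ends : List (String × Int × Int × String)) (tname : String) (output_endpos : Bool) (tlen : Int) : Decidable (Pre_identify_corrected_ends exoninfo startpos endpos transcript_to_genomic_ends tname output_endpos tlen) := by unfold Pre_identify_corrected_ends; infer_instance

def pvWitness_identify_corrected_ends : List Int × Int × Int × (List (String × Int × Int × String)) × String × Bool × Int :=
  ([3, 4, 5], 1, 9, [("t", 0, 0, "-")], "t", true, 12)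

def Spec_identify_corrected_ends (exoninfo : List Int) (startpos : Int) (endpos : Int) (transcript_to_genomic_ends : List (String × Int × Int × String)) (tname : String) (output_endpos : Bool) (tlen : Int) (out : Option Int × Option Int × Option Int × Option Int) : Prop := out = identify_corrected_ends_alt exoninfo startpos endpos transcript_to_genomic_ends tname output_endpos tlen
instance (exoninfo : List Int) (startpos : Int) (endpos : Int) (transcript_to_genomic_ends : List (String × Int × Int × String)) (tname : String) (output_endpos : Bool) (tlen : Int) (out : Option Int × Option Int × Option Int × Option Int) : Decidable (Spec_identify_corrected_ends exoninfo startpos endpos transcript_to_genomic_ends tname output_endpos tlen out) := by unfold Spec_identify_corrected_ends; infer_instance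

-- ===== CLAIM (what is proved, stated in full; the proofs are below) =====
def Claim_equal_identify_corrected_ends : Prop := ∀ (exoninfo : List Int) (startpos : Int) (endpos : Int) (transcript_to_genomic_ends : List (String × Int × Int × String)) (tname : String) (output_endpos : Bool) (tlen : Int), Dom_identify_corrected_ends exoninfo startpos endpos transcript_to_genomic_ends tname output_endpos tlen → Pre_identify_corrected_ends exoninfo startpos endpos transcript_to_genomic_ends tname output_endpos tlen → Spec_identify_corrected_ends exoninfo startpos endpos transcript_to_genomic_ends tname output_endpos tlen (identify_corrected_ends exoninfo startpos endpos transcript_to_genomic_ends tname output_endpos tlen)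

-- ===== LEMMAS AND PROOFS =====

theorem pvAccum_length (c : Int) (xs : List Int) : (pvAccum c xs).length = xs.length := by
  induction xs generalizing c with
  | nil => rfl
  | cons e xs ih => simp [pvAccum, ih]

theorem pvAccum_getElem (c : Int) (xs : List Int) (i : Nat) (hi : i < xs.length) :
    (pvAccum c xs)[i]'(by rw [pvAccum_length]; exact hi) = c + (xs.take (i + 1)).sum := by
  induction xs generalizing c i with
  | nil => simp at hi
  | cons e xs ih =>
    cases i with
    | zero => simp [pvAccum]
    | succ j =>
      have hj : j < xs.length := by simpa using hi
      simp [pvAccum, ih (c + e) j hj, add_assoc]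

theorem pvAccum_sorted (c : Int) (xs : List Int) (h : ∀ x ∈ xs, 0 ≤ x) :
    List.Pairwise (fun a b => a ≤ b) (pvAccum c xs) := by
  rw [List.pairwise_iff_getElem]
  intro i j hi hj hij
  rw [pvAccum_length] at hi hj
  rw [pvAccum_getElem c xs i hi, pvAccum_getElem c xs j hj]
  have : ((xs.take (i + 1)).sum) ≤ ((xs.take (j + 1)).sum) := by
    have hsub : xs.take (j + 1) = xs.take (i + 1) ++ ((xs.take (j + 1)).drop (i + 1)) := by
      conv_lhs => rw [← List.take_append_drop (i + 1) (xs.take (j + 1))]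
      rw [List.take_take]
      congr 2
      omega
    rw [hsub, List.sum_append]
    have : 0 ≤ ((xs.take (j + 1)).drop (i + 1)).sum := by
      apply List.sum_nonneg
      intro x hx
      exact h x (List.mem_of_mem_take (List.mem_of_mem_drop hx))
    omega
  omega

-- prefix-sum table entries are running sums of the exon list
theorem pvP_getD (exoninfo : List Int) (k : Nat) (hk : k < exoninfo.length - 1) :
    (pvAccum 0 exoninfo.dropLast).getD k 0 = (exoninfo.take (k + 1)).sum := by
  have hlen : k < (pvAccum 0 exoninfo.dropLast).length := by
    rw [pvAccum_length, List.length_dropLast]; exact hk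
  rw [List.getD_eq_getElem _ _ hlen]
  have hk' : k < exoninfo.dropLast.length := by rw [List.length_dropLast]; exact hk
  rw [pvAccum_getElem 0 exoninfo.dropLast k hk']
  rw [List.dropLast_eq_take, List.take_take]
  have : min (k + 1) (exoninfo.length - 1) = k + 1 := by omega
  rw [this, zero_add]

theorem pvSum_take_succ (exoninfo : List Int) (k : Nat) (hk : k < exoninfo.length) :
    (exoninfo.take (k + 1)).sum = (exoninfo.take k).sum + exoninfo.getD k 0 := by
  rw [List.take_add_one, List.sum_append, List.getD_eq_getElem _ _ hk,
    List.getElem?_eq_getElem hk]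
  simp

-- loop invariant: A's scan state after the first k indices, via the bisection points in the table
theorem pvLoopA_inv (exoninfo : List Int) (startpos endpos : Int)
    (hpos : ∀ x ∈ exoninfo.dropLast, 0 ≤ x) (k : Nat) (hk : k ≤ exoninfo.length - 1) :
    List.foldl (pvStepA startpos endpos exoninfo) (0, none, none, none, none)
        (List.map (fun (j : Nat) => (j : Int)) (List.range k)) =
      ((exoninfo.take k).sum,
       if PySem.List.bisectRight (pvAccum 0 exoninfo.dropLast) startpos < k
         then some ((PySem.List.bisectRight (pvAccum 0 exoninfo.dropLast) startpos : Int)) else none,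
       if PySem.List.bisectRight (pvAccum 0 exoninfo.dropLast) startpos < k
         then some ((pvAccum 0 exoninfo.dropLast).getD
           (PySem.List.bisectRight (pvAccum 0 exoninfo.dropLast) startpos) 0 - startpos) else none,
       if 0 < min k (PySem.List.bisectLeft (pvAccum 0 exoninfo.dropLast) endpos)
         then some ((min k (PySem.List.bisectLeft (pvAccum 0 exoninfo.dropLast) endpos) : Int) - 1) else none,
       if 0 < min k (PySem.List.bisectLeft (pvAccum 0 exoninfo.dropLast) endpos)
         then some (endpos - (pvAccum 0 exoninfo.dropLast).getD
           (min k (PySem.List.bisectLeft (pvAccum 0 exoninfo.dropLast) endpos) - 1) 0) else none) := by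
  have hsorted : List.Pairwise (fun a b => a ≤ b) (pvAccum 0 exoninfo.dropLast) :=
    pvAccum_sorted 0 exoninfo.dropLast hpos
  obtain ⟨hbr_le, hbr_lo, hbr_hi⟩ := PySem.List.bisectRight_spec (pvAccum 0 exoninfo.dropLast) startpos hsorted
  obtain ⟨hbl_le, hbl_lo, hbl_hi⟩ := PySem.List.bisectLeft_spec (pvAccum 0 exoninfo.dropLast) endpos hsorted
  set P := pvAccum 0 exoninfo.dropLast with hP
  set br := PySem.List.bisectRight P startpos with hbr
  set bl := PySem.List.bisectLeft P endpos with hbl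
  have hPlen : P.length = exoninfo.length - 1 := by
    rw [hP, pvAccum_length, List.length_dropLast]
  induction k with
  | zero => simp
  | succ k ih =>
    have hk' : k ≤ exoninfo.length - 1 := by omega
    have hkm : k < exoninfo.length - 1 := by omega
    have hkn : k < exoninfo.length := by omega
    have hsplit : (List.map (fun (j : Nat) => (j : Int)) (List.range (k+1))) =
        (List.map (fun (j : Nat) => (j : Int)) (List.range k)) ++ [(k : Int)] := by
      simp [List.range_succ]
    rw [hsplit, List.foldl_append, ih hk']
    have hPk : P.getD k 0 = (exoninfo.take (k + 1)).sum := pvP_getD exoninfo k hkm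
    have hPkE : P[k]'(by omega) = P.getD k 0 := (List.getD_eq_getElem _ _ (by omega)).symm
    -- the two scan conditions, read off the bisection specs
    have hleft : startpos < (exoninfo.take (k + 1)).sum ↔ br ≤ k := by
      constructor
      · intro h; by_contra hc
        have := hbr_lo k (by omega) (by omega)
        rw [hPkE, hPk] at this; omega
      · intro h
        have := hbr_hi k (by omega) h
        rw [hPkE, hPk] at this; omega
    have hright : (exoninfo.take (k + 1)).sum < endpos ↔ k < bl := by
      constructor
      · intro h; by_contra hc
        have := hbl_hi k (by omega) (by omega)
        rw [hPkE, hPk] at this; omega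
      · intro h
        have := hbl_lo k (by omega) h
        rw [hPkE, hPk] at this; omega
    simp only [List.foldl_cons, List.foldl_nil, pvStepA]
    have hget : PySem.List.pyGetD exoninfo (k : Int) 0 = exoninfo.getD k 0 :=
      PySem.List.pyGetD_natCast exoninfo k 0
    have hsum : (exoninfo.take k).sum + exoninfo.getD k 0 = (exoninfo.take (k + 1)).sum :=
      (pvSum_take_succ exoninfo k hkn).symm
    simp only [hget, hsum]
    have hPk2 : P[k]?.getD 0 = (exoninfo.take (k + 1)).sum := by
      rw [List.getElem?_eq_getElem (show k < P.length by omega), Option.getD_some, hPkE, hPk]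
    refine Prod.ext rfl (Prod.ext ?_ (Prod.ext ?_ (Prod.ext ?_ ?_))) <;> simp only
    · -- left intron index
      by_cases h2 : br < k
      · simp [h2, show br < k + 1 by omega]
      · by_cases h1 : br ≤ k
        · have hbk : br = k := by omega
          simp [hleft.mpr h1, hbk]
        · simp [show ¬ br < k by omega,
            show ¬ startpos < (exoninfo.take (k + 1)).sum from fun h => h1 (hleft.mp h),
            show ¬ br < k + 1 by omega]
    · -- left distance
      by_cases h2 : br < k
      · simp [h2, show br < k + 1 by omega]
      · by_cases h1 : br ≤ k
        · have hbk : br = k := by omega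
          simp [hleft.mpr h1, hbk, hPk2]
        · simp [show ¬ br < k by omega,
            show ¬ startpos < (exoninfo.take (k + 1)).sum from fun h => h1 (hleft.mp h),
            show ¬ br < k + 1 by omega]
    · -- right intron index
      by_cases h2 : k < bl
      · simp [hright.mpr h2, show 0 < min (k + 1) bl by omega]
        omega
      · have hnc : ¬ (exoninfo.take (k + 1)).sum < endpos := fun h => h2 (hright.mp h)
        simp only [if_neg hnc]
        split_ifs <;> simp_all <;> omega
    · -- right distance
      by_cases h2 : k < bl
      · have hm : min (k + 1) bl = k + 1 := by omega
        simp [hright.mpr h2, hm, hPk2]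
      · have hnc : ¬ (exoninfo.take (k + 1)).sum < endpos := fun h => h2 (hright.mp h)
        have hm : min (k + 1) bl = min k bl := by omega
        simp only [if_neg hnc, hm]

theorem identify_corrected_ends_spec : Claim_equal_identify_corrected_ends := by
  unfold Claim_equal_identify_corrected_ends
  intro exoninfo startpos endpos tge tname oe tlen hdom hpre
  unfold Spec_identify_corrected_ends identify_corrected_ends identify_corrected_ends_alt
  cases oe with
  | false => simp
  | true =>
    by_cases hlen : 1 < exoninfo.length
    · obtain ⟨hpos, hkey, hstrand⟩ := hpre rfl hlen
      have hsorted : List.Pairwise (fun a b => a ≤ b) (pvAccum 0 exoninfo.dropLast) :=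
        pvAccum_sorted 0 exoninfo.dropLast hpos
      have hbr_le := (PySem.List.bisectRight_spec (pvAccum 0 exoninfo.dropLast) startpos hsorted).1
      have hbl_le := (PySem.List.bisectLeft_spec (pvAccum 0 exoninfo.dropLast) endpos hsorted).1
      set P := pvAccum 0 exoninfo.dropLast with hP
      set br := PySem.List.bisectRight P startpos with hbr
      set bl := PySem.List.bisectLeft P endpos with hbl
      have hPlen : P.length = exoninfo.length - 1 := by
        rw [hP, pvAccum_length, List.length_dropLast]
      set m := exoninfo.length - 1 with hmdef
      have hm : PySem.List.len exoninfo - 1 = ((m : Nat) : Int) := by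
        rw [PySem.List.len_eq]; omega
      rw [hm, PySem.List.pyRange_zero_natCast,
        pvLoopA_inv exoninfo startpos endpos hpos m (le_refl _)]
      -- the four pre-strand components agree
      have hli : (if br < m then some (br : Int) else none) =
          (if br = P.length then none else some (br : Int)) := by
        split_ifs <;> first | rfl | omega
      have hld : (if br < m then some (P.getD br 0 - startpos) else none) =
          (if br = P.length then none else some (P.getD br 0 - startpos)) := by
        split_ifs <;> first | rfl | omega
      have hri : (if 0 < min m bl then some ((min m bl : Int) - 1) else none) =
          (if ((bl : Int) - 1) < 0 then none else some ((bl : Int) - 1)) := by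
        by_cases h0 : bl = 0
        · have hnm : ¬ 0 < min m bl := by omega
          simp [h0]
        · have h1 : 0 < min m bl := by omega
          rw [if_pos h1, if_neg (by omega : ¬ ((bl : Int) - 1 < 0))]
          congr 1
          omega
      have hrd : (if 0 < min m bl then some (endpos - P.getD (min m bl - 1) 0) else none) =
          (if ((bl : Int) - 1) < 0 then none
           else some (endpos - P.getD ((bl : Int) - 1).toNat 0)) := by
        have ht : ((bl : Int) - 1).toNat = bl - 1 := by omega
        by_cases h0 : bl = 0
        · have hnm : ¬ 0 < min m bl := by omega
          simp [h0]
        · have h1 : 0 < min m bl := by omega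
          have h2 : min m bl - 1 = bl - 1 := by omega
          rw [ht, if_pos h1, if_neg (by omega : ¬ ((bl : Int) - 1 < 0)), h2]
      dsimp only
      rw [← hP, ← hbr, ← hbl]
      simp only [hlen, if_pos, Bool.not_true, Bool.false_eq_true, if_false,
        show ¬ exoninfo.length ≤ 1 by omega, hli, hld, hri, hrd]
    · simp [hlen, show exoninfo.length ≤ 1 by omega]
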